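-- pv_equiv track=rewrite | github.com/kosarev/cherries | tests/range_set_tests.py | bit_string_to_points
-- ===== SOURCE A (Python) =====
-- import itertools
--
-- TEST_BIT_STRING_RANGE = -5, 25
--
-- def bit_string_to_points(bits):
--     bits = [x == 'x' for x in bits]
--     groups = [list(g) for k, g in itertools.groupby(bits)]
--
--     points = []
--     pos = TEST_BIT_STRING_RANGE[0]
--     for i, g in enumerate(groups):
--         if i > 0:
--             points.append(pos)
--         pos += len(g)
--
--     return points
-- ===== SOURCE B (Python) =====
-- TEST_BIT_STRING_RANGE = -5, 25
--
-- def bit_string_to_points(bits):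
--     points = []
--     prev = False
--     for i, c in enumerate(bits):
--         cur = c == 'x'
--         if i > 0 and cur != prev:
--             points.append(TEST_BIT_STRING_RANGE[0] + i)
--         prev = cur
--     return points
-- ===== Notes on version B (the rewrite author's own statement) =====
-- stated objective: simpler
-- what changed: Drops itertools.groupby and the materialized list-of-group-lists: B is a single enumerate pass over the characters keeping only the previous boolean and emitting TEST_BIT_STRING_RANGE[0]+i at each transition.
import Mathlib
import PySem

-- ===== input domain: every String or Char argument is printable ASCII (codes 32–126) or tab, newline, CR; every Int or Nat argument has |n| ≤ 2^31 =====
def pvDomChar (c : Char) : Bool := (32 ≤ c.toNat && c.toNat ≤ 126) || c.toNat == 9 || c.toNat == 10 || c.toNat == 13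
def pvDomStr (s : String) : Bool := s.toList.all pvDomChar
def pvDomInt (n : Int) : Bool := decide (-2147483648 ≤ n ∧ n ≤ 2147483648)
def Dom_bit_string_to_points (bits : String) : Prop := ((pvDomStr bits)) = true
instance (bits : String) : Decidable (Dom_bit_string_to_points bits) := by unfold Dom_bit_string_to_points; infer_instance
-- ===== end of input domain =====

-- B replaces A's itertools.groupby + list-of-group-lists with a single enumerate scan
-- keeping only the previous boolean (objective: simpler).

-- ===== PORT A =====
-- hand port of itertools.groupby over a list of Bools (a step of it: collect the run of
-- elements equal to `b`, return (run, remainder)); exact for this use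
def pvTakeRun (b : Bool) : List Bool → List Bool × List Bool
  | [] => ([], [])
  | x :: xs => if x = b then
      let p := pvTakeRun b xs
      (x :: p.1, p.2)
    else ([], x :: xs)

theorem pvTakeRun_snd_le (b : Bool) (bs : List Bool) : (pvTakeRun b bs).2.length ≤ bs.length := by
  induction bs with
  | nil => simp [pvTakeRun]
  | cons x xs ih =>
    simp only [pvTakeRun]
    split
    · simpa using Nat.le_succ_of_le ih
    · simp

-- hand port of `[list(g) for k, g in itertools.groupby(bits)]`: the consecutive runs of
-- equal elements, in order; exact for lists of Bools
def pvRuns : List Bool → List (List Bool)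
  | [] => []
  | x :: xs => (x :: (pvTakeRun x xs).1) :: pvRuns (pvTakeRun x xs).2
termination_by l => l.length
decreasing_by exact Nat.lt_succ_of_le (pvTakeRun_snd_le _ _)

-- A's `for i, g in enumerate(groups)` loop over (points, pos)
def pvALoop : Nat → List (List Bool) → List Int → Int → List Int
  | _, [], pts, _ => pts
  | i, g :: rest, pts, pos =>
      pvALoop (i + 1) rest (if 0 < i then pts ++ [pos] else pts) (pos + g.length)

def bit_string_to_points (bits : String) : List Int :=
  pvALoop 0 (pvRuns (bits.toList.map (fun x => x == 'x'))) [] (-5)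

-- ===== PORT B =====
-- B's `for i, c in enumerate(bits)` loop over (points, prev), carrying the index
def pvBLoop : Nat → Bool → List Char → List Int → List Int
  | _, _, [], pts => pts
  | i, prev, c :: cs, pts =>
      let cur := c == 'x'
      pvBLoop (i + 1) cur cs (if 0 < i ∧ cur ≠ prev then pts ++ [(-5 : Int) + i] else pts)

def bit_string_to_points_alt (bits : String) : List Int :=
  pvBLoop 0 false bits.toList []

-- ===== PRECONDITION & SPEC =====
def Spec_bit_string_to_points (bits : String) (out : List Int) : Prop := out = bit_string_to_points_alt bits
instance (bits : String) (out : List Int) : Decidable (Spec_bit_string_to_points bits out) := by unfold Spec_bit_string_to_points; infer_instance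

-- ===== CLAIM (what is proved, stated in full; the proofs are below) =====
def Claim_equal_bit_string_to_points : Prop := ∀ (bits : String), Dom_bit_string_to_points bits → Spec_bit_string_to_points bits (bit_string_to_points bits)

-- ===== LEMMAS AND PROOFS =====

-- positions (starting at `pos`) where the boolean differs from its predecessor
def pvChanges (pos : Int) (p : Bool) : List Bool → List Int
  | [] => []
  | b :: bs => if b ≠ p then pos :: pvChanges (pos + 1) b bs else pvChanges (pos + 1) b bs

-- group-start positions: one point per group after the first
def pvStarts (pos : Int) : List (List Bool) → List Int
  | [] => []
  | g :: rest => pos :: pvStarts (pos + g.length) rest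

theorem pvALoop_eq (gs : List (List Bool)) : ∀ (i : Nat) (pts : List Int) (pos : Int),
    1 ≤ i → pvALoop i gs pts pos = pts ++ pvStarts pos gs := by
  induction gs with
  | nil => intro i pts pos _; simp [pvALoop, pvStarts]
  | cons g rest ih =>
    intro i pts pos hi
    simp only [pvALoop, pvStarts]
    rw [if_pos (by omega), ih (i + 1) _ _ (by omega)]
    simp

theorem pvBLoop_eq (cs : List Char) : ∀ (i : Nat) (prev : Bool) (pts : List Int),
    1 ≤ i → pvBLoop i prev cs pts = pts ++ pvChanges (-5 + i) prev (cs.map (fun x => x == 'x')) := by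
  induction cs with
  | nil => intro i prev pts _; simp [pvBLoop, pvChanges]
  | cons c cs ih =>
    intro i prev pts hi
    simp only [pvBLoop, pvChanges, List.map]
    rw [ih (i + 1) _ _ (by omega)]
    by_cases h : (c == 'x') ≠ prev
    · rw [if_pos ⟨by omega, h⟩, if_pos h]
      simp only [List.append_assoc, List.singleton_append]
      congr 2
      push_cast; ring
    · rw [if_neg (by tauto), if_neg h]
      congr 2
      push_cast; ring

-- the central lemma: the changes-scan equals the group-start list of the remaining runs
theorem pvChanges_eq_starts : ∀ (n : Nat) (bs : List Bool), bs.length ≤ n → ∀ (b : Bool) (pos : Int),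
    pvChanges pos b bs = pvStarts (pos + ((pvTakeRun b bs).1.length : Int)) (pvRuns (pvTakeRun b bs).2) := by
  intro n
  induction n with
  | zero =>
    intro bs hbs b pos
    have : bs = [] := List.length_eq_zero_iff.mp (Nat.le_zero.mp hbs)
    subst this
    simp [pvChanges, pvTakeRun, pvRuns, pvStarts]
  | succ n ih =>
    intro bs hbs b pos
    cases bs with
    | nil => simp [pvChanges, pvTakeRun, pvRuns, pvStarts]
    | cons x xs =>
      simp only [pvChanges, pvTakeRun]
      by_cases hx : x = b
      · rw [if_neg (by simp [hx]), if_pos hx]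
        rw [ih xs (by simpa using hbs) x (pos + 1)]
        subst hx
        congr 1
        simp only [List.length_cons]
        push_cast; ring
      · rw [if_pos (by simp [hx]), if_neg hx]
        rw [pvRuns]
        simp only [pvStarts, List.length_cons, List.length_nil]
        refine congrArg₂ List.cons (by push_cast; ring_nf) ?_
        rw [ih xs (by simpa using hbs) x (pos + 1)]
        congr 1
        push_cast; ring

theorem bit_string_to_points_eq (bits : String) :
    bit_string_to_points bits = bit_string_to_points_alt bits := by
  unfold bit_string_to_points bit_string_to_points_alt
  cases h : bits.toList with
  | nil => simp [pvALoop, pvBLoop, pvRuns]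
  | cons c cs =>
    simp only [List.map]
    rw [pvRuns]
    simp only [pvALoop, pvBLoop]
    rw [if_neg (by omega), if_neg (by simp)]
    rw [pvALoop_eq _ 1 [] _ (le_refl 1), pvBLoop_eq cs 1 _ [] (le_refl 1)]
    push_cast
    rw [pvChanges_eq_starts cs.length (cs.map (fun x => x == 'x')) (by simp) (c == 'x') (-4)]
    simp only [List.nil_append, List.length_cons]
    congr 1
    push_cast; ring

-- ===== VERDICT (by name: the statement is the Claim_ definition above) =====
theorem bit_string_to_points_spec : Claim_equal_bit_string_to_points := by
  intro bits _
  unfold Spec_bit_string_to_points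
  exact bit_string_to_points_eq bits
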